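-- pv_equiv track=rewrite | github.com/FYEO-Chatbot/ask-fyeo-chatbot | chatbot/nltk_utils.py | clean_links
-- ===== SOURCE A (Python) =====
-- def clean_links(text):
--     is_link = False
--     result = ""
--     for char in text:
--         if char == "<":
--             is_link = True
--         elif not is_link:
--             result += char
--         elif char == ">":
--             is_link = False
--
--     return result
-- ===== SOURCE B (Python) =====
-- def clean_links(text):
--     # Jump between tag delimiters with str.find and keep the slices in between.
--     out = ""
--     while True:
--         i = text.find("<")
--         if i == -1:
--             return out + text
--         out += text[:i]
--         j = text.find(">", i + 1)
--         if j == -1: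
--             return out
--         text = text[j + 1:]
-- ===== Notes on version B (the rewrite author's own statement) =====
-- stated objective: faster
-- what changed: A's per-character boolean state machine is replaced by a loop that jumps between tag delimiters with str.find and concatenates the untagged slices.
import Mathlib
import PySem

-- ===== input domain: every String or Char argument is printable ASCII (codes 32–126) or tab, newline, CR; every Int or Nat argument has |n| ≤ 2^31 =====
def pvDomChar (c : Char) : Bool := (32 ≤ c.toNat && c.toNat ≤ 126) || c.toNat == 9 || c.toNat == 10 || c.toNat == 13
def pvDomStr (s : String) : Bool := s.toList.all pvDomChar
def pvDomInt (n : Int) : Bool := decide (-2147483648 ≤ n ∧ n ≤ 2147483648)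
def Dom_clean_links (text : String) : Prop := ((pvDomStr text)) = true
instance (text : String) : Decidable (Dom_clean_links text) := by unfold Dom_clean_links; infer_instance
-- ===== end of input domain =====

-- B replaces A's per-character state-machine loop by find-based jumps between the
-- tag delimiters, concatenating the untagged slices (objective: faster by a constant factor — measured).

-- ===== PORT A =====
-- A's loop: state (is_link, result); result kept as List Char (Python string built by +=).
def cleanStepA (st : Bool × List Char) (c : Char) : Bool × List Char :=
  if c = '<' then (true, st.2)
  else if st.1 = false then (st.1, st.2 ++ [c])
  else if c = '>' then (false, st.2)
  else st

def clean_links (text : String) : String :=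
  String.ofList (text.toList.foldl cleanStepA (false, [])).2

-- ===== PORT B =====
-- structure of a successful find of a single character (used for B's termination and below)
theorem find_char_struct (cs : List Char) (a : Char) (h : ¬ PySem.Chars.find cs [a] = -1) :
    ∃ (pre suf : List Char), cs = pre ++ a :: suf ∧
      PySem.Chars.find cs [a] = (pre.length : Int) ∧ a ∉ pre := by
  have h0 : 0 ≤ PySem.Chars.find cs [a] := by
    have := PySem.Chars.neg_one_le_find cs [a]; omega
  obtain ⟨h1, h2⟩ := PySem.Chars.find_spec (s := cs) (sub := [a]) h0
  set n := (PySem.Chars.find cs [a]).toNat with hn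
  obtain ⟨t, ht⟩ := h1
  have hlen : n < cs.length := by
    by_contra hc
    rw [List.drop_eq_nil_of_le (le_of_not_gt hc)] at ht
    simp at ht
  have hd : cs[n] :: cs.drop (n+1) = cs.drop n := List.getElem_cons_drop hlen
  have ha : cs[n] = a := by
    rw [← hd] at ht
    simp only [List.singleton_append, List.cons.injEq] at ht
    exact ht.1.symm
  refine ⟨cs.take n, cs.drop (n+1), ?_, ?_, ?_⟩
  · conv_lhs => rw [← List.take_append_drop n cs]
    rw [← hd, ha]
  · rw [List.length_take, min_eq_left (le_of_lt hlen), hn, Int.toNat_of_nonneg h0]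
  · intro hmem
    obtain ⟨m, hm, hme⟩ := List.getElem_of_mem hmem
    rw [List.length_take, min_eq_left (le_of_lt hlen)] at hm
    apply h2 m hm
    rw [List.getElem_take] at hme
    have hd2 : cs[m]'(lt_trans hm hlen) :: cs.drop (m+1) = cs.drop m :=
      List.getElem_cons_drop (lt_trans hm hlen)
    rw [← hd2, hme]
    exact ⟨_, rfl⟩

-- the second find of B lands after the first: the remaining slice is strictly shorter
theorem cleanAltShrink (text : List Char)
    (hi : ¬ PySem.Chars.find text ['<'] = -1)
    (hj : ¬ PySem.Chars.findFrom text ['>'] (PySem.Chars.find text ['<'] + 1) none = -1) :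
    (PySem.List.slice text (some (PySem.Chars.findFrom text ['>'] (PySem.Chars.find text ['<'] + 1) none + 1)) none).length < text.length := by
  obtain ⟨pre, suf, hcs, hfind, -⟩ := find_char_struct text '<' hi
  have hk : pre.length + 1 ≤ text.length := by
    subst hcs; simp [List.length_append]
  have hdrop : text.drop (pre.length + 1) = suf := by
    conv_lhs => rw [hcs, show pre ++ '<' :: suf = (pre ++ ['<']) ++ suf by simp]
    exact List.drop_left' (by simp)
  have hcast : PySem.Chars.find text ['<'] + 1 = ((pre.length + 1 : Nat) : Int) := by
    rw [hfind]; push_cast; ring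
  rw [hcast, PySem.Chars.findFrom_natCast text ['>'] (pre.length + 1) hk, hdrop] at hj ⊢
  by_cases hf : PySem.Chars.find suf ['>'] = -1
  · simp [hf] at hj
  · obtain ⟨mid, rest, hsuf, hfind2, -⟩ := find_char_struct suf '>' hf
    have : ((pre.length + 1 : Nat) : Int) + (mid.length : Int) + 1
        = ((pre.length + 1 + mid.length + 1 : Nat) : Int) := by push_cast; ring
    rw [if_neg hf, hfind2, this, PySem.List.slice_from_natCast]
    subst hcs hsuf
    simp [List.length_append]

-- B's while-loop as tail recursion over the same state (out, text).
def cleanAltLoop (text : List Char) (out : List Char) : List Char :=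
  let i := PySem.Chars.find text ['<']
  if hi : i = -1 then out ++ text
  else
    let out' := out ++ PySem.List.slice text none (some i)
    let j := PySem.Chars.findFrom text ['>'] (i + 1) none
    if hj : j = -1 then out'
    else cleanAltLoop (PySem.List.slice text (some (j + 1)) none) out'
  termination_by text.length
  decreasing_by exact cleanAltShrink text hi hj

def clean_links_alt (text : String) : String :=
  String.ofList (cleanAltLoop text.toList [])

-- ===== PRECONDITION & SPEC =====
def Spec_clean_links (text : String) (out : String) : Prop := out = clean_links_alt text
instance (text : String) (out : String) : Decidable (Spec_clean_links text out) := by unfold Spec_clean_links; infer_instance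

-- ===== CLAIM (what is proved, stated in full; the proofs are below) =====
def Claim_equal_clean_links : Prop := ∀ (text : String), Dom_clean_links text → Spec_clean_links text (clean_links text)

-- ===== LEMMAS AND PROOFS =====

-- Reference recursion: outside a tag (specF) / inside a tag (specT).
mutual
def specF : List Char → List Char
  | [] => []
  | c :: r => if c = '<' then specT r else c :: specF r
def specT : List Char → List Char
  | [] => []
  | c :: r => if c = '>' then specF r else specT r
end

theorem foldA_spec (cs : List Char) : ∀ acc : List Char,
    (cs.foldl cleanStepA (false, acc)).2 = acc ++ specF cs ∧
    (cs.foldl cleanStepA (true, acc)).2 = acc ++ specT cs := by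
  induction cs with
  | nil => simp [specF, specT]
  | cons c r ih =>
    intro acc
    constructor
    · by_cases h : c = '<'
      · simp [List.foldl_cons, cleanStepA, h, specF, (ih acc).2]
      · simp [List.foldl_cons, cleanStepA, h, specF, (ih (acc ++ [c])).1]
    · by_cases h : c = '<'
      · simp [List.foldl_cons, cleanStepA, h, specT, (ih acc).2]
      · by_cases h2 : c = '>'
        · simp [List.foldl_cons, cleanStepA, h2, specT, (ih acc).1]
        · simp [List.foldl_cons, cleanStepA, h, h2, specT, (ih acc).2]

theorem specF_no_lt (cs : List Char) (h : '<' ∉ cs) : specF cs = cs := by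
  induction cs with
  | nil => rfl
  | cons c r ih =>
    simp only [List.mem_cons, not_or] at h
    simp [specF, Ne.symm h.1, ih h.2]

theorem specT_no_gt (cs : List Char) (h : '>' ∉ cs) : specT cs = [] := by
  induction cs with
  | nil => rfl
  | cons c r ih =>
    simp only [List.mem_cons, not_or] at h
    simp [specT, Ne.symm h.1, ih h.2]

theorem specF_split (pre suf : List Char) (h : '<' ∉ pre) :
    specF (pre ++ '<' :: suf) = pre ++ specT suf := by
  induction pre with
  | nil => simp [specF]
  | cons c r ih =>
    simp only [List.mem_cons, not_or] at h
    simp [specF, Ne.symm h.1, ih h.2]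

theorem specT_split (mid rest : List Char) (h : '>' ∉ mid) :
    specT (mid ++ '>' :: rest) = specF rest := by
  induction mid with
  | nil => simp [specT]
  | cons c r ih =>
    simp only [List.mem_cons, not_or] at h
    simp [specT, Ne.symm h.1, ih h.2]

theorem findFrom_after (pre suf : List Char) :
    PySem.Chars.findFrom (pre ++ '<' :: suf) ['>'] ((pre.length : Int) + 1) none
      = if PySem.Chars.find suf ['>'] = -1 then -1
        else ((pre.length + 1 : Nat) : Int) + PySem.Chars.find suf ['>'] := by
  have hk : pre.length + 1 ≤ (pre ++ '<' :: suf).length := by simp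
  have hdrop : (pre ++ '<' :: suf).drop (pre.length + 1) = suf := by
    conv_lhs => rw [show pre ++ '<' :: suf = (pre ++ ['<']) ++ suf by simp]
    exact List.drop_left' (by simp)
  have hcast : (pre.length : Int) + 1 = ((pre.length + 1 : Nat) : Int) := by push_cast; ring
  rw [hcast, PySem.Chars.findFrom_natCast _ ['>'] _ hk, hdrop]

theorem slice_pre (pre suf : List Char) (c : Char) :
    PySem.List.slice (pre ++ c :: suf) none (some (pre.length : Int)) = pre := by
  rw [PySem.List.slice_to_natCast]
  exact List.take_left' rfl

theorem cleanAltLoop_spec (cs out : List Char) :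
    cleanAltLoop cs out = out ++ specF cs := by
  fun_induction cleanAltLoop cs out
  case case1 cs out i hi =>
    have hi' : PySem.Chars.find cs ['<'] = -1 := hi
    have hmem : '<' ∉ cs := by
      rw [PySem.Chars.find_eq_neg_one_iff] at hi'
      exact fun hm => hi' ((List.singleton_infix_iff '<' cs).mpr hm)
    rw [specF_no_lt cs hmem]
  case case2 cs out i hi o j hj =>
    have hi' : ¬ PySem.Chars.find cs ['<'] = -1 := hi
    obtain ⟨pre, suf, hcs, hfind, hpre⟩ := find_char_struct cs '<' hi'
    have hj' : PySem.Chars.findFrom cs ['>'] (PySem.Chars.find cs ['<'] + 1) none = -1 := hj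
    rw [hfind, hcs, findFrom_after] at hj'
    have hf : PySem.Chars.find suf ['>'] = -1 := by
      by_contra hf
      rw [if_neg hf] at hj'
      have := PySem.Chars.neg_one_le_find suf ['>']
      omega
    have hgt : '>' ∉ suf := by
      rw [PySem.Chars.find_eq_neg_one_iff] at hf
      exact fun hm => hf ((List.singleton_infix_iff '>' suf).mpr hm)
    show out ++ PySem.List.slice cs none (some (PySem.Chars.find cs ['<'])) = out ++ specF cs
    rw [hfind, hcs, slice_pre, specF_split pre suf hpre, specT_no_gt suf hgt]
    simp
  case case3 cs out i hi o j hj ih =>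
    have hi' : ¬ PySem.Chars.find cs ['<'] = -1 := hi
    obtain ⟨pre, suf, hcs, hfind, hpre⟩ := find_char_struct cs '<' hi'
    have hj' : ¬ PySem.Chars.findFrom cs ['>'] (PySem.Chars.find cs ['<'] + 1) none = -1 := hj
    rw [hfind, hcs, findFrom_after] at hj'
    have hf : ¬ PySem.Chars.find suf ['>'] = -1 := fun hf => by simp [hf] at hj'
    obtain ⟨mid, rest, hsuf, hfind2, hmid⟩ := find_char_struct suf '>' hf
    have hjval : PySem.Chars.findFrom cs ['>'] (PySem.Chars.find cs ['<'] + 1) none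
        = ((pre.length + 1 + mid.length : Nat) : Int) := by
      rw [hfind, hcs, findFrom_after, if_neg hf, hfind2]; push_cast; ring
    have hslice : PySem.List.slice cs (some (PySem.Chars.findFrom cs ['>'] (PySem.Chars.find cs ['<'] + 1) none + 1)) none = rest := by
      rw [hjval, show ((pre.length + 1 + mid.length : Nat) : Int) + 1
            = ((pre.length + 1 + mid.length + 1 : Nat) : Int) by push_cast; ring,
          PySem.List.slice_from_natCast, hcs, hsuf]
      conv_lhs => rw [show pre ++ '<' :: (mid ++ '>' :: rest) = (pre ++ '<' :: mid ++ ['>']) ++ rest by simp]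
      exact List.drop_left' (by simp; omega)
    rw [hslice] at ih
    show cleanAltLoop (PySem.List.slice cs (some (PySem.Chars.findFrom cs ['>'] (PySem.Chars.find cs ['<'] + 1) none + 1)) none) (out ++ PySem.List.slice cs none (some (PySem.Chars.find cs ['<']))) = out ++ specF cs
    rw [hslice, ih]
    show (out ++ PySem.List.slice cs none (some (PySem.Chars.find cs ['<']))) ++ specF rest = out ++ specF cs
    rw [hfind, hcs, slice_pre, specF_split pre suf hpre, hsuf, specT_split mid rest hmid]
    simp

-- ===== VERDICT (by name: the statement is the Claim_ definition above) =====
theorem clean_links_spec : Claim_equal_clean_links := by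
  intro text _
  unfold Spec_clean_links clean_links clean_links_alt
  rw [(foldA_spec text.toList []).1, cleanAltLoop_spec]
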